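-- pv_equiv track=rewrite | github.com/starfishwrx/- | feishu_doc.py | _resolve_root_block_id
-- ===== SOURCE A (Python) =====
-- from typing import Any, Dict, List, Optional, Tuple
--
-- def _resolve_root_block_id(document_id: str, blocks: List[Dict[str, Any]]) -> str:
--     for block in blocks:
--         if int(block.get("block_type") or 0) != 1:
--             continue
--         parent_id = str(block.get("parent_id") or "").strip()
--         block_id = str(block.get("block_id") or "").strip()
--         if block_id and not parent_id:
--             return block_id
--     for block in blocks:
--         block_id = str(block.get("block_id") or "").strip()
--         if block_id == document_id:
--             return block_id
--     return document_id
-- ===== SOURCE B (Python) =====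
-- from typing import Any, Dict, List, Optional, Tuple
--
-- def _resolve_root_block_id(document_id: str, blocks: List[Dict[str, Any]]) -> str:
--     fallback = None
--     for block in blocks:
--         block_id = str(block.get("block_id") or "").strip()
--         if int(block.get("block_type") or 0) == 1:
--             parent_id = str(block.get("parent_id") or "").strip()
--             if block_id and not parent_id:
--                 return block_id
--         if fallback is None and block_id == document_id:
--             fallback = block_id
--     return fallback if fallback is not None else document_id
-- ===== Notes on version B (the rewrite author's own statement) =====
-- stated objective: alternative
-- what changed: B merges A's two scans into a single pass that maintains one fallback variable (the first block_id equal to document_id), returning a type-1 parentless root immediately and the fallback (or document_id) only after the loop.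
import Mathlib
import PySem

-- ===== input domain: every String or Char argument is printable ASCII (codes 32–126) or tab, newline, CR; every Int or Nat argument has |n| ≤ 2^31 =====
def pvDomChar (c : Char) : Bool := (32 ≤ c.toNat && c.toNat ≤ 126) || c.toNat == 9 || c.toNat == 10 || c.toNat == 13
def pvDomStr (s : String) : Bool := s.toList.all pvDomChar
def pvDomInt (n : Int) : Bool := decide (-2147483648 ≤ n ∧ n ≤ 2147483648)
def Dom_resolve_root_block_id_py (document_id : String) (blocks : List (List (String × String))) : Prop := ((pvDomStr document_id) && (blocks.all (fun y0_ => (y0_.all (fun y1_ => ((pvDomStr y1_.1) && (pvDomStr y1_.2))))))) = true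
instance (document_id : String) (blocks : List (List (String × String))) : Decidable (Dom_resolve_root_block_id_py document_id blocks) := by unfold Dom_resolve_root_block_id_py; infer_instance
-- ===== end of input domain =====

-- B is a single pass with a fallback accumulator instead of A's two scans; return value only, no mutation.

-- ===== PORT A =====
-- shared transliteration helpers: block.get(k), str(… or "").strip(), int(block.get("block_type") or 0)
def pvGetS (b : List (String × String)) (k : String) : String :=
  ((PySem.Dict.mk b).get? k).getD ""           -- block.get(k): first match; missing or "" both give "" under `or ""`

def pvStripGet (b : List (String × String)) (k : String) : String :=
  PySem.Str.strip (pvGetS b k)                 -- str(block.get(k) or "").strip()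

def pvBtype? (b : List (String × String)) : Option Int :=
  let s := pvGetS b "block_type"
  if s = "" then some 0 else PySem.Int.ofStr? s  -- int(block.get("block_type") or 0); none = ValueError (excluded by Pre_)

-- first for-loop of A: first block with block_type == 1, nonempty block_id, empty parent_id
def pvLoopA1 : List (List (String × String)) → Option String
  | [] => none
  | b :: rest =>
      if pvBtype? b = some 1 then
        if pvStripGet b "block_id" ≠ "" ∧ pvStripGet b "parent_id" = "" then some (pvStripGet b "block_id")
        else pvLoopA1 rest
      else pvLoopA1 rest   -- includes pvBtype? b = none, where Python raises ValueError (excluded by Pre_)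

-- second for-loop of A: first block whose stripped block_id equals document_id
def pvLoopA2 (document_id : String) : List (List (String × String)) → Option String
  | [] => none
  | b :: rest =>
      if pvStripGet b "block_id" = document_id then some (pvStripGet b "block_id")
      else pvLoopA2 document_id rest

def resolve_root_block_id_py (document_id : String) (blocks : List (List (String × String))) : String :=
  match pvLoopA1 blocks with
  | some r => r
  | none =>
    match pvLoopA2 document_id blocks with
    | some r => r
    | none => document_id

-- ===== PORT B =====
-- single pass carrying the fallback (first block_id equal to document_id) as an accumulator
def pvScanB (document_id : String) (fallback : Option String) : List (List (String × String)) → String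
  | [] => fallback.getD document_id
  | b :: rest =>
      let block_id := pvStripGet b "block_id"
      if pvBtype? b = some 1 ∧ block_id ≠ "" ∧ pvStripGet b "parent_id" = "" then block_id
      else pvScanB document_id
             (if fallback = none ∧ block_id = document_id then some block_id else fallback) rest

def resolve_root_block_id_py_alt (document_id : String) (blocks : List (List (String × String))) : String :=
  pvScanB document_id none blocks

-- ===== PRECONDITION & SPEC =====
-- Pre_ excludes exactly the inputs on which Python raises ValueError: a block whose "block_type"
-- value does not parse as an int, with no earlier type-1 parentless root block (both A and B raise there).
def Pre_resolve_root_block_id_py (document_id : String) (blocks : List (List (String × String))) : Prop :=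
  ∀ i, (h : i < blocks.length) → pvBtype? blocks[i] = none →
    ∃ j, ∃ _ : j < i, ∃ hj : j < blocks.length,
      pvBtype? blocks[j] = some 1 ∧ pvStripGet blocks[j] "block_id" ≠ "" ∧ pvStripGet blocks[j] "parent_id" = ""
instance (document_id : String) (blocks : List (List (String × String))) : Decidable (Pre_resolve_root_block_id_py document_id blocks) := by unfold Pre_resolve_root_block_id_py; infer_instance

def pvWitness_resolve_root_block_id_py : String × (List (List (String × String))) :=
  ("d1", [[("block_id", "d1"), ("block_type", "2")], [("x", "y")]])

def Spec_resolve_root_block_id_py (document_id : String) (blocks : List (List (String × String))) (out : String) : Prop := out = resolve_root_block_id_py_alt document_id blocks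
instance (document_id : String) (blocks : List (List (String × String))) (out : String) : Decidable (Spec_resolve_root_block_id_py document_id blocks out) := by unfold Spec_resolve_root_block_id_py; infer_instance

-- ===== CLAIM (what is proved, stated in full; the proofs are below) =====
def Claim_equal_resolve_root_block_id_py : Prop := ∀ (document_id : String) (blocks : List (List (String × String))), Dom_resolve_root_block_id_py document_id blocks → Pre_resolve_root_block_id_py document_id blocks → Spec_resolve_root_block_id_py document_id blocks (resolve_root_block_id_py document_id blocks)

-- ===== LEMMAS AND PROOFS =====

-- Pre_ on a cons whose head is not a root passes to the tail
theorem pre_tail (document_id : String) (b : List (String × String)) (rest : List (List (String × String)))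
    (h : Pre_resolve_root_block_id_py document_id (b :: rest)) (hb : ¬ (pvBtype? b = some 1 ∧ pvStripGet b "block_id" ≠ "" ∧ pvStripGet b "parent_id" = "")) :
    Pre_resolve_root_block_id_py document_id rest := by
  intro i hi hnone
  obtain ⟨j, hji, hjl, hroot⟩ := h (i + 1) (by simpa using Nat.succ_lt_succ hi) (by simpa using hnone)
  match j, hji, hjl, hroot with
  | 0, _, _, hroot => exact absurd hroot hb
  | j + 1, hji, hjl, hroot =>
    exact ⟨j, by omega, by simpa using Nat.lt_of_succ_lt_succ hjl, by simpa using hroot⟩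

-- main invariant: B's scan equals A's two loops, for any fallback accumulator
theorem scan_eq (document_id : String) (blocks : List (List (String × String))) :
    ∀ fallback : Option String, Pre_resolve_root_block_id_py document_id blocks →
    pvScanB document_id fallback blocks =
      match pvLoopA1 blocks with
      | some r => r
      | none =>
        match fallback with
        | some f => f
        | none => (pvLoopA2 document_id blocks).getD document_id := by
  induction blocks with
  | nil => intro fallback _; cases fallback <;> simp [pvScanB, pvLoopA1, pvLoopA2]
  | cons b rest ih =>
    intro fallback hpre
    by_cases hroot : pvBtype? b = some 1 ∧ pvStripGet b "block_id" ≠ "" ∧ pvStripGet b "parent_id" = ""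
    · obtain ⟨h1, h2, h3⟩ := hroot
      simp [pvScanB, pvLoopA1, h1, h2, h3]
    · have htail := pre_tail document_id b rest hpre hroot
      have hstep : pvScanB document_id fallback (b :: rest) =
          pvScanB document_id
            (if fallback = none ∧ pvStripGet b "block_id" = document_id
             then some (pvStripGet b "block_id") else fallback) rest := by
        simp only [pvScanB]
        rw [if_neg (by simpa using hroot)]
      rw [hstep, ih _ htail]
      have hA1 : pvLoopA1 (b :: rest) = pvLoopA1 rest := by
        simp only [pvLoopA1]
        by_cases h1 : pvBtype? b = some 1
        · rw [if_pos h1, if_neg (fun hc => hroot ⟨h1, hc⟩)]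
        · rw [if_neg h1]
      rw [hA1]
      cases hL : pvLoopA1 rest with
      | some r => simp
      | none =>
        cases fallback with
        | some f => simp
        | none =>
          by_cases hid : pvStripGet b "block_id" = document_id
          · simp [hid, pvLoopA2]
          · simp [pvLoopA2, hid]

-- ===== VERDICT (by name: the statement is the Claim_ definition above) =====
theorem resolve_root_block_id_py_spec : Claim_equal_resolve_root_block_id_py := by
  intro document_id blocks _ hpre
  unfold Spec_resolve_root_block_id_py resolve_root_block_id_py resolve_root_block_id_py_alt
  rw [scan_eq document_id blocks none hpre]
  cases pvLoopA1 blocks <;> cases hL : pvLoopA2 document_id blocks <;> simp
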